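-- pv_equiv track=rewrite | github.com/EvilPatrick06/Programming-Class-Project | .vscode/git_sync.py | extract_pr_title_from_copilot_response
-- ===== SOURCE A (Python) =====
-- def extract_pr_title_from_copilot_response(response):
--     """Extract PR title from GitHub Copilot's response"""
--     try:
--         lines = response.strip().split('\n')
--
--         # Method 1: Look for gh pr create command with title
--         for line in lines:
--             if 'gh pr create' in line and '--title' in line:
--                 parts = line.split('--title')
--                 if len(parts) > 1:
--                     title_part = parts[1].strip()
--                     if title_part.startswith('"'):
--                         end_quote = title_part.find('"', 1)
--                         if end_quote > 0:
--                             return title_part[1:end_quote]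
--
--         # Method 2: Look for standalone titles (short, descriptive lines)
--         for line in lines:
--             line = line.strip()
--             if (line and
--                 not line.startswith('$') and
--                 not line.startswith('#') and
--                 not line.startswith('gh ') and
--                 not line.startswith('git ') and
--                 len(line) > 5 and
--                 len(line) < 70):  # Good title length
--
--                 # Skip common non-title patterns
--                 if not any(word in line.lower() for word in
--                           ['command', 'run', 'execute', 'suggest', 'copilot', 'description']):
--                     return line
--
--         return None
--     except Exception:
--         return None
-- ===== SOURCE B (Python) =====
-- def _cmd_title(line):
--     """Title quoted after --title in a 'gh pr create' command line, else None."""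
--     if 'gh pr create' not in line or '--title' not in line:
--         return None
--     parts = line.split('--title')
--     if len(parts) <= 1:
--         return None
--     t = parts[1].strip()
--     if not t or t[0] != '"':
--         return None
--     body = t[1:]
--     q = body.find('"')
--     return body[:q] if q >= 0 else None
--
--
-- def _is_title(s):
--     """Does the stripped line look like a standalone PR title?"""
--     n = len(s)
--     if n <= 5 or n >= 70:
--         return False
--     if s[0] in '$#' or s.startswith(('gh ', 'git ')):
--         return False
--     low = s.lower()
--     return all(w not in low for w in
--                ('command', 'run', 'execute', 'suggest', 'copilot', 'description'))
--
--
-- def extract_pr_title_from_copilot_response(response):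
--     """Extract PR title from GitHub Copilot's response (one merged pass:
--     early return on a gh-pr-create title, first standalone title as fallback)."""
--     try:
--         fallback = None
--         for line in response.strip().split('\n'):
--             t = _cmd_title(line)
--             if t is not None:
--                 return t
--             if fallback is None:
--                 s = line.strip()
--                 if _is_title(s):
--                     fallback = s
--         return fallback
--     except Exception:
--         return None
-- ===== Notes on version B (the rewrite author's own statement) =====
-- stated objective: alternative
-- what changed: A scans the line list twice (a Method-1 loop that early-returns a quoted --title argument, then a Method-2 loop over standalone titles); B makes one merged pass that early-returns on the first Method-1 hit and keeps the first Method-2 line in a once-set fallback variable, with the per-line tests decomposed into two helper predicates written over the head/tail of the string (t[0], t[1:], body.find) instead of startswith/find-from-1/slicing.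
import Mathlib
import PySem

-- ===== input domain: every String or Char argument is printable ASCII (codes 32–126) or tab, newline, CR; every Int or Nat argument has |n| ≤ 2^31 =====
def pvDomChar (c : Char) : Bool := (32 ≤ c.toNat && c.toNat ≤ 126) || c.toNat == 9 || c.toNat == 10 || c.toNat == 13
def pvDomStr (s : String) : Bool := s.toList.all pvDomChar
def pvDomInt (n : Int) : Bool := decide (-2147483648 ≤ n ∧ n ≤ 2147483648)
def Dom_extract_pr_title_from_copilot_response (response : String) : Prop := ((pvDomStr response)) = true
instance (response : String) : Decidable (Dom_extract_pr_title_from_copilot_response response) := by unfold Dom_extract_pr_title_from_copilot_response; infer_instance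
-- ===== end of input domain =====

-- B replaces A's two sequential scans (Method-1 loop, then Method-2 loop) by ONE merged pass
-- that returns early on the first gh-pr-create title and keeps the first standalone-title line
-- as a fallback, with the per-line checks decomposed into two predicates written over the
-- head/tail of the character list instead of startswith/findFrom/slice (objective: alternative).
-- A's try/except never fires on a string input, so both functions are total.

-- ===== PORT A =====
-- s.split(sep) with the non-empty literal seps of A, exact: PySem.Chars.splitOn
def pvSplit (s sep : String) : List String :=
  (PySem.Chars.splitOn s.toList sep.toList).map String.ofList

-- Method-1 loop: 'for line in lines: … return title_part[1:end_quote] …' (continue = recurse)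
def pvALoop1 : List String → Option String
  | [] => none
  | line :: rest =>
    if PySem.Str.isIn "gh pr create" line && PySem.Str.isIn "--title" line then
      let parts := pvSplit line "--title"
      if parts.length > 1 then
        let title_part := PySem.Str.strip (parts.getD 1 "")
        if PySem.Str.startswith title_part "\"" then
          let end_quote := PySem.Str.findFrom title_part "\"" 1
          if end_quote > 0 then
            some (PySem.Str.slice title_part (some 1) (some end_quote))
          else pvALoop1 rest
        else pvALoop1 rest
      else pvALoop1 rest
    else pvALoop1 rest

-- Method-2 loop: 'for line in lines: line = line.strip(); … return line'
def pvALoop2 : List String → Option String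
  | [] => none
  | line0 :: rest =>
    let line := PySem.Str.strip line0
    if !(line == "") && !PySem.Str.startswith line "$" && !PySem.Str.startswith line "#"
        && !PySem.Str.startswith line "gh " && !PySem.Str.startswith line "git "
        && PySem.Str.len line > 5 && PySem.Str.len line < 70 then
      if !(["command", "run", "execute", "suggest", "copilot", "description"].any
            (fun w => PySem.Str.isIn w (PySem.Str.lower line))) then
        some line
      else pvALoop2 rest
    else pvALoop2 rest

def extract_pr_title_from_copilot_response (response : String) : Option String :=
  let lines := pvSplit (PySem.Str.strip response) "\n"
  match pvALoop1 lines with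
  | some t => some t
  | none =>
    match pvALoop2 lines with
    | some t => some t
    | none => none

-- ===== PORT B =====
-- _cmd_title(line): guard clauses, then t[0]/t[1:] on the character list and body.find('"')
def pvCmdTitle (line : String) : Option String :=
  if !(PySem.Str.isIn "gh pr create" line) || !(PySem.Str.isIn "--title" line) then none
  else
    let parts := pvSplit line "--title"
    if parts.length ≤ 1 then none
    else
      match (PySem.Str.strip (parts.getD 1 "")).toList with
      | [] => none                                   -- 'not t'
      | c :: body =>
        if c ≠ '"' then none                         -- "t[0] != '\"'"
        else
          let q := PySem.Chars.find body "\"".toList -- body.find('"')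
          if q ≥ 0 then some (String.ofList (body.take q.toNat)) else none

-- _is_title(s): length window first, then the prefix tests, then the banned words (all-not)
def pvIsTitle (s : String) : Bool :=
  let n := s.toList.length
  if n ≤ 5 || 70 ≤ n then false
  else if (match s.toList with | [] => false | c :: _ => c == '$' || c == '#')
          || "gh ".toList.isPrefixOf s.toList || "git ".toList.isPrefixOf s.toList then false
  else
    let low := PySem.Chars.lower s.toList
    ["command", "run", "execute", "suggest", "copilot", "description"].all
      (fun w => !PySem.Chars.isIn w.toList low)

-- the merged pass: early return on _cmd_title, once-set fallback from _is_title
def pvBLoop : List String → Option String → Option String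
  | [], fb => fb
  | line :: rest, fb =>
    match pvCmdTitle line with
    | some t => some t
    | none =>
      match fb with
      | some v => pvBLoop rest (some v)
      | none =>
        let s := PySem.Str.strip line
        pvBLoop rest (if pvIsTitle s then some s else none)

def extract_pr_title_from_copilot_response_alt (response : String) : Option String :=
  pvBLoop (pvSplit (PySem.Str.strip response) "\n") none

-- ===== PRECONDITION & SPEC =====
def Spec_extract_pr_title_from_copilot_response (response : String) (out : Option String) : Prop := out = extract_pr_title_from_copilot_response_alt response
instance (response : String) (out : Option String) : Decidable (Spec_extract_pr_title_from_copilot_response response out) := by unfold Spec_extract_pr_title_from_copilot_response; infer_instance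

-- ===== CLAIM (what is proved, stated in full; the proofs are below) =====
def Claim_equal_extract_pr_title_from_copilot_response : Prop := ∀ (response : String), Dom_extract_pr_title_from_copilot_response response → Spec_extract_pr_title_from_copilot_response response (extract_pr_title_from_copilot_response response)

-- ===== LEMMAS AND PROOFS =====

theorem beq_empty (s : String) : (s == "") = s.toList.isEmpty := by
  by_cases hs : s = ""
  · subst hs; rfl
  · have h2 : s.toList ≠ [] := fun h => hs (String.toList_eq_nil_iff.mp h)
    rw [List.isEmpty_eq_false_iff.mpr h2]
    exact beq_eq_false_iff_ne.mpr hs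

theorem if_if_collapse {α : Type} (a w : Bool) (k₁ k₂ : α) :
    (if a then (if w then k₁ else k₂) else k₂) = if (a && w) then k₁ else k₂ := by
  cases a <;> cases w <;> simp

theorem pvM2_step (s : String) (k₁ k₂ : Option String) :
    (if !(s == "") && !PySem.Str.startswith s "$" && !PySem.Str.startswith s "#"
        && !PySem.Str.startswith s "gh " && !PySem.Str.startswith s "git "
        && PySem.Str.len s > 5 && PySem.Str.len s < 70 then
      if !(["command", "run", "execute", "suggest", "copilot", "description"].any
            (fun w => PySem.Str.isIn w (PySem.Str.lower s))) then
        k₁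
      else k₂
    else k₂) = (if pvIsTitle s then k₁ else k₂) := by
  simp only [pvIsTitle, PySem.Str.startswith, PySem.Chars.startswith, PySem.Str.isIn,
    PySem.Chars.isIn, PySem.Str.len, PySem.Str.lower, beq_empty, String.toList_ofList,
    List.not_any_eq_all_not.symm]
  obtain ⟨l, hl⟩ : ∃ l, s.toList = l := ⟨_, rfl⟩
  simp only [hl]
  rcases l with _ | ⟨c, tl⟩
  · simp
  · simp only [List.isEmpty_cons, Bool.not_false, Bool.true_and, List.length_cons]
    have hpref : ∀ d : Char, [d].isPrefixOf (c :: tl) = (d == c) := by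
      intro d; simp [List.isPrefixOf]
    rw [show ("$".toList) = ['$'] from rfl, show ("#".toList) = ['#'] from rfl, hpref, hpref,
      if_if_collapse]
    congr 1
    generalize (!(["command", "run", "execute", "suggest", "copilot", "description"].any
        (fun u => PySem.Chars.find (PySem.Chars.lower (c :: tl)) u.toList != -1))) = wb
    rw [show ('$' == c) = (c == '$') from Bool.beq_comm, show ('#' == c) = (c == '#') from Bool.beq_comm]
    rcases Bool.eq_false_or_eq_true (c == '$') with hq1 | hq1 <;>
      rcases Bool.eq_false_or_eq_true (c == '#') with hq2 | hq2 <;>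
      rcases Bool.eq_false_or_eq_true ("gh ".toList.isPrefixOf (c :: tl)) with hg | hg <;>
      rcases Bool.eq_false_or_eq_true ("git ".toList.isPrefixOf (c :: tl)) with hgi | hgi <;>
      cases wb <;>
      simp only [hq1, hq2, hg, hgi, Bool.not_true, Bool.not_false, Bool.false_and, Bool.true_and,
        Bool.and_false, Bool.and_true, Bool.or_false, Bool.or_true, if_true] <;>
      simp <;> omega

theorem quote_step (t : String) (k : Option String) :
    (if PySem.Str.startswith t "\"" then
      (if PySem.Str.findFrom t "\"" 1 > 0 then
        some (PySem.Str.slice t (some 1) (some (PySem.Str.findFrom t "\"" 1)))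
      else k)
    else k)
    = ((match t.toList with
        | [] => none
        | c :: body =>
          if c ≠ '"' then none
          else
            if PySem.Chars.find body "\"".toList ≥ 0 then
              some (String.ofList (body.take (PySem.Chars.find body "\"".toList).toNat))
            else none) : Option String).or k := by
  obtain ⟨l, hl⟩ : ∃ l, t.toList = l := ⟨_, rfl⟩
  rcases l with _ | ⟨c, body⟩
  · rw [hl]
    rw [if_neg (by simp [PySem.Str.startswith, PySem.Chars.startswith, hl])]
    simp [Option.or]
  · rw [hl]
    by_cases hc : c = '"'
    · subst hc
      rw [if_pos (by simp [PySem.Str.startswith, PySem.Chars.startswith, hl, List.isPrefixOf])]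
      have hff : PySem.Str.findFrom t "\"" 1 =
          (if PySem.Chars.find body "\"".toList = -1 then -1
           else 1 + PySem.Chars.find body "\"".toList) := by
        simp only [PySem.Str.findFrom, PySem.Chars.findFrom, hl]
        rw [show (if (1:Int) < 0 then if 1 + ((('"' :: body).length : Int)) < 0 then 0
              else 1 + ((('"' :: body).length : Int)) else 1) = 1 from by norm_num]
        rw [if_neg (by push_cast [List.length_cons]; omega)]
        simp
      rw [hff]
      by_cases hfind : PySem.Chars.find body "\"".toList = -1
      · rw [if_pos hfind]
        rw [if_neg (by norm_num)]
        have hfind' : PySem.Chars.find body ['"'] = -1 := hfind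
        show k = Option.or (if 0 ≤ PySem.Chars.find body ['"'] then _ else none) k
        rw [if_neg (by omega)]
        cases k <;> rfl
      · have hr : 0 ≤ PySem.Chars.find body "\"".toList := by
          have := PySem.Chars.neg_one_le_find body "\"".toList
          omega
        rw [if_neg hfind]
        rw [if_pos (by omega)]
        have hle := PySem.Chars.find_le_length body "\"".toList
        have hslice : PySem.Str.slice t (some 1) (some (1 + PySem.Chars.find body "\"".toList)) =
            String.ofList (List.take (PySem.Chars.find body "\"".toList).toNat body) := by
          simp only [PySem.Str.slice, PySem.Chars.slice, PySem.List.slice, PySem.List.clampIdx, hl]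
          congr 1
          rw [if_neg (by omega), if_neg (by omega)]
          simp only [List.length_cons]
          have h1 : min (1:Int).toNat (body.length + 1) = 1 := by omega
          have h2 : min (1 + PySem.Chars.find body "\"".toList).toNat (body.length + 1)
              = (PySem.Chars.find body "\"".toList).toNat + 1 := by omega
          rw [h1, h2]
          simp
        rw [hslice]
        have hr' : 0 ≤ PySem.Chars.find body ['"'] := hr
        show _ = Option.or (if 0 ≤ PySem.Chars.find body ['"'] then _ else none) k
        rw [if_pos hr']
        rfl
    · rw [if_neg (by
        simp only [PySem.Str.startswith, PySem.Chars.startswith, hl]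
        simp
        exact Ne.symm hc)]
      have : (c ≠ '"') = True := by simp [hc]
      simp only [this, if_true]
      simp [Option.or]


-- A's Method-1 step on one line is B's _cmd_title
theorem pvALoop1_cons (line : String) (rest : List String) :
    pvALoop1 (line :: rest) = (pvCmdTitle line).or (pvALoop1 rest) := by
  simp only [pvALoop1, pvCmdTitle]
  cases hg1 : PySem.Str.isIn "gh pr create" line <;>
    cases hg2 : PySem.Str.isIn "--title" line <;>
    simp only [Bool.and_true, Bool.and_false, Bool.not_true, Bool.not_false,
      Bool.or_true, Bool.or_false, if_true, if_false, Bool.false_eq_true]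
  · simp [Option.or]
  · simp [Option.or]
  · simp [Option.or]
  · by_cases hp : (pvSplit line "--title").length ≤ 1
    · rw [if_neg (by omega), if_pos hp]
      simp [Option.or]
    · rw [if_pos (by omega), if_neg hp]
      exact quote_step (PySem.Str.strip ((pvSplit line "--title").getD 1 "")) (pvALoop1 rest)

-- A's Method-2 step on one line is B's strip-then-_is_title
theorem pvALoop2_cons (line : String) (rest : List String) :
    pvALoop2 (line :: rest) =
      (if pvIsTitle (PySem.Str.strip line) then some (PySem.Str.strip line) else none).or
        (pvALoop2 rest) := by
  simp only [pvALoop2]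
  rw [pvM2_step (PySem.Str.strip line) (some (PySem.Str.strip line)) (pvALoop2 rest)]
  cases pvIsTitle (PySem.Str.strip line) <;> simp [Option.or]

-- invariant of B's merged pass
theorem pvBLoop_eq (lines : List String) :
    ∀ fb : Option String,
      pvBLoop lines fb = (pvALoop1 lines).or (fb.or (pvALoop2 lines)) := by
  induction lines with
  | nil => intro fb; simp [pvBLoop, pvALoop1, pvALoop2]
  | cons line rest ih =>
    intro fb
    rw [pvALoop1_cons, pvALoop2_cons]
    cases h : pvCmdTitle line with
    | some t => simp [pvBLoop, h, Option.or]
    | none =>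
      cases fb with
      | some v =>
        simp only [pvBLoop, h, ih]
        cases pvALoop1 rest <;> simp [Option.or]
      | none =>
        simp only [pvBLoop, h, ih]
        cases pvALoop1 rest <;>
          cases hm : (if pvIsTitle (PySem.Str.strip line) then some (PySem.Str.strip line) else none) <;>
          simp [Option.or]

-- ===== VERDICT (by name: the statement is the Claim_ definition above) =====
theorem extract_pr_title_from_copilot_response_spec : Claim_equal_extract_pr_title_from_copilot_response := by
  unfold Claim_equal_extract_pr_title_from_copilot_response
  intro response _
  unfold Spec_extract_pr_title_from_copilot_response
  unfold extract_pr_title_from_copilot_response extract_pr_title_from_copilot_response_alt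
  rw [pvBLoop_eq]
  cases h1 : pvALoop1 (pvSplit (PySem.Str.strip response) "\n") <;>
    cases h2 : pvALoop2 (pvSplit (PySem.Str.strip response) "\n") <;>
    simp [h1, h2, Option.or]
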